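-- pv_equiv track=rewrite | github.com/javathought/learnPy | src/main/python/cio/upper_first_letter.py | correct_sentence
-- ===== SOURCE A (Python) =====
-- def correct_sentence(text: str) -> str:
--     """
--         returns a corrected sentence which starts with a capital letter
--         and ends with a dot.
--     """
--     # your code here
--     deb = text[0]
--     # if (deb.isalpha):
--         # text[0] = deb.upper()
--
--     res = ""
--     for ind, char in enumerate(text):
--         if ind == 0:
--             res += char.upper()
--         else:
--             res += char
--
--         if ind == len(text) - 1 and char != '.':
--             res += "."
--
--     return res
-- ===== SOURCE B (Python) =====
-- def correct_sentence(text: str) -> str: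
--     return text[0].upper() + text[1:] + ("" if text.endswith(".") else ".")
-- ===== Notes on version B (the rewrite author's own statement) =====
-- stated objective: simpler
-- what changed: Replaces the enumerate loop that rebuilds the string char by char with a single closed-form expression: uppercased first char + slice + conditional trailing dot via str.endswith.
import Mathlib
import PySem

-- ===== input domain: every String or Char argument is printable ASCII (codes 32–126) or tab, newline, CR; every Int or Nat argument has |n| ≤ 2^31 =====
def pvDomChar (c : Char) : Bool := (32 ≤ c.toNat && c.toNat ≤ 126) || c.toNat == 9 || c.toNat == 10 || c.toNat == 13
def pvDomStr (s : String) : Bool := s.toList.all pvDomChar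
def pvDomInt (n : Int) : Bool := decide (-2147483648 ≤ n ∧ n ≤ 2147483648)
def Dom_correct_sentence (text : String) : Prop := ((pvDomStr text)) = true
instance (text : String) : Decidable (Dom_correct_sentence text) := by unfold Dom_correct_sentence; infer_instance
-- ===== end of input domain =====

-- B replaces A's char-by-char accumulation loop with one closed-form expression
-- (uppercased head + tail slice + conditional trailing dot); objective: simpler.

-- ===== PORT A =====
-- the loop body of A's 'for ind, char in enumerate(text)' (n = len(text))
def pvStepA (n : Int) (res : List Char) (p : Int × Char) : List Char :=
  let res := if p.1 = 0 then res ++ [PySem.Chars.upperChar p.2] else res ++ [p.2]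
  if p.1 = n - 1 ∧ p.2 ≠ '.' then res ++ ['.'] else res

def correct_sentence (text : String) : String :=
  let cs := text.toList
  match PySem.List.pyGet? cs 0 with     -- deb = text[0]; none = IndexError (outside Pre_)
  | none => ""
  | some _deb =>
    String.ofList ((PySem.List.enumerate cs 0).foldl (pvStepA (cs.length : Int)) [])

-- ===== PORT B =====
def correct_sentence_alt (text : String) : String :=
  match PySem.Str.pyGet? text 0 with    -- text[0]; none = IndexError (outside Pre_)
  | none => ""
  | some c =>
    String.ofList ([PySem.Chars.upperChar c]
      ++ PySem.List.slice text.toList (some 1) none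
      ++ (if PySem.Str.endswith text "." then [] else ['.']))

-- ===== PRECONDITION & SPEC =====
-- A (and B) raise IndexError on the empty string via text[0]; Pre_ excludes exactly that.
def Pre_correct_sentence (text : String) : Prop := text ≠ ""
instance (text : String) : Decidable (Pre_correct_sentence text) := by
  unfold Pre_correct_sentence; infer_instance
def pvWitness_correct_sentence : String := "hello"

def Spec_correct_sentence (text : String) (out : String) : Prop := out = correct_sentence_alt text
instance (text : String) (out : String) : Decidable (Spec_correct_sentence text out) := by
  unfold Spec_correct_sentence; infer_instance

-- ===== CLAIM (what is proved, stated in full; the proofs are below) =====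
def Claim_equal_correct_sentence : Prop := ∀ (text : String), Dom_correct_sentence text → Pre_correct_sentence text → Spec_correct_sentence text (correct_sentence text)

-- ===== LEMMAS AND PROOFS =====

-- what A's loop produces for the tail (indices ≥ 1) of the string
def pvTail : List Char → List Char
  | [] => []
  | [c] => c :: (if c ≠ '.' then ['.'] else [])
  | c :: d :: rest => c :: pvTail (d :: rest)

theorem pvLoopA (l : List Char) (s : Int) (acc : List Char) (n : Int)
    (hs : 1 ≤ s) (hn : n = s + l.length) :
    (PySem.List.enumerate l s).foldl (pvStepA n) acc = acc ++ pvTail l := by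
  induction l generalizing s acc with
  | nil => simp [PySem.List.enumerate_nil, pvTail]
  | cons c rest ih =>
    rw [PySem.List.enumerate_cons, List.foldl_cons]
    have hstep : pvStepA n acc (s, c)
        = if rest = [] ∧ c ≠ '.' then acc ++ [c] ++ ['.'] else acc ++ [c] := by
      have h0 : ¬ (s = 0) := by omega
      have hlast : (s = n - 1) ↔ rest = [] := by
        constructor
        · intro h; cases rest with
          | nil => rfl
          | cons r rs => simp [List.length_cons] at hn; omega
        · rintro rfl; simp at hn; omega
      simp only [pvStepA, h0, if_false, hlast]
    cases rest with
    | nil =>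
      rw [hstep]; by_cases hc : c = '.'
      · simp [PySem.List.enumerate_nil, hc, pvTail]
      · simp [PySem.List.enumerate_nil, hc, pvTail]
    | cons r rs =>
      have : ¬ ((r :: rs : List Char) = [] ∧ c ≠ '.') := by simp
      rw [hstep, if_neg this,
        ih (s + 1) (acc ++ [c]) (by omega) (by simp at hn ⊢; omega)]
      simp [pvTail]

theorem pvTail_eq (l : List Char) (h : l ≠ []) :
    pvTail l = l ++ (if l.getLast? = some '.' then [] else ['.']) := by
  induction l with
  | nil => exact absurd rfl h
  | cons c rest ih =>
    cases rest with
    | nil =>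
      by_cases hc : c = '.' <;> simp [pvTail, hc]
    | cons r rs =>
      rw [show pvTail (c :: r :: rs) = c :: pvTail (r :: rs) from rfl,
        ih (by simp), List.getLast?_cons_cons]
      simp

theorem pvEndswith_dot (l : List Char) (h : l ≠ []) :
    PySem.Chars.endswith l ['.'] = true ↔ l.getLast? = some '.' := by
  rw [PySem.Chars.endswith_iff]
  constructor
  · rintro ⟨t, rfl⟩; simp
  · intro hl
    obtain ⟨l', rfl⟩ := List.getLast?_eq_some_iff.mp hl
    exact ⟨l', rfl⟩

theorem pvMain (text : String) (hp : text ≠ "") :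
    correct_sentence text = correct_sentence_alt text := by
  have hne : text.toList ≠ [] := by
    intro h; apply hp
    have := congrArg String.ofList h
    simpa using this
  obtain ⟨c, rest, hcs⟩ : ∃ c rest, text.toList = c :: rest := by
    cases h : text.toList with
    | nil => exact absurd h hne
    | cons a l => exact ⟨a, l, rfl⟩
  unfold correct_sentence correct_sentence_alt
  simp only [PySem.Str.pyGet?_eq, hcs, PySem.Chars.pyGet?_eq_listPyGet?, PySem.List.pyGet?_zero_cons]
  have hslice : PySem.List.slice (c :: rest) (some 1) none = rest := by
    rw [PySem.List.slice_from_one]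
    rfl
  have hends : PySem.Str.endswith text "." = PySem.Chars.endswith (c :: rest) ['.'] := by
    rw [← hcs]; simp [PySem.Str.endswith]
  rw [PySem.List.enumerate_cons, List.foldl_cons]
  cases rest with
  | nil =>
    have hstep : pvStepA ((([c] : List Char).length : Int)) [] (0, c)
        = [PySem.Chars.upperChar c] ++ (if c ≠ '.' then ['.'] else []) := by
      by_cases hc : c = '.' <;> simp [pvStepA, hc]
    rw [hstep, PySem.List.enumerate_nil, List.foldl_nil, hslice, hends]
    by_cases hc : c = '.'
    · simp [hc, PySem.Chars.endswith]
    · have : PySem.Chars.endswith [c] ['.'] = false := by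
        rw [Bool.eq_false_iff]; intro hcon
        rw [pvEndswith_dot [c] (by simp)] at hcon
        simp at hcon; exact hc hcon
      simp [hc, this]
  | cons r rs =>
    have hstep : pvStepA (((c :: r :: rs : List Char).length : Int)) [] (0, c)
        = [PySem.Chars.upperChar c] := by
      simp only [pvStepA]
      simp only [List.length_cons]
      norm_num
      intro h
      exact absurd h (by omega)
    rw [hstep, show (0 : Int) + 1 = 1 from rfl,
      pvLoopA (r :: rs) 1 [PySem.Chars.upperChar c] ((c :: r :: rs : List Char).length : Int)
        (by omega) (by simp only [List.length_cons]; push_cast; ring),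
      pvTail_eq (r :: rs) (by simp), hslice, hends]
    have hlast : (c :: r :: rs : List Char).getLast? = (r :: rs : List Char).getLast? :=
      List.getLast?_cons_cons ..
    by_cases hd : (r :: rs : List Char).getLast? = some '.'
    · have he : PySem.Chars.endswith (c :: r :: rs) ['.'] = true := by
        rw [pvEndswith_dot _ (by simp), hlast]; exact hd
      simp [hd, he]
    · have he : PySem.Chars.endswith (c :: r :: rs) ['.'] = false := by
        rw [Bool.eq_false_iff]; intro hcon
        rw [pvEndswith_dot _ (by simp), hlast] at hcon; exact hd hcon
      simp [hd, he]

-- ===== VERDICT (by name: the statement is the Claim_ definition above) =====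
theorem correct_sentence_spec : Claim_equal_correct_sentence := by
  intro text _ hp
  unfold Spec_correct_sentence
  exact pvMain text hp
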